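-- pv_equiv track=rewrite | github.com/xocas123/Information-Security-Privacy-and-Policy | analysis_metrics.py | _calculate_risk_distribution
-- ===== SOURCE A (Python) =====
-- from typing import Dict, List, Any, Tuple
--
-- def _calculate_risk_distribution(component_risks: Dict[str, Dict]) -> Dict[str, int]:
--     """Calculate distribution of components across risk levels"""
--     distribution = {'low': 0, 'medium': 0, 'high': 0, 'critical': 0}
--
--     for risk_data in component_risks.values():
--         risk_score = risk_data['compound_risk']
--         if risk_score < 3:
--             distribution['low'] += 1
--         elif risk_score < 6:
--             distribution['medium'] += 1
--         elif risk_score < 8: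
--             distribution['high'] += 1
--         else:
--             distribution['critical'] += 1
--
--     return distribution
-- ===== SOURCE B (Python) =====
-- def _calculate_risk_distribution(component_risks):
--     """Calculate distribution of components across risk levels"""
--     scores = [rd['compound_risk'] for rd in component_risks.values()]
--     below3 = sum(1 for s in scores if s < 3)
--     below6 = sum(1 for s in scores if s < 6)
--     below8 = sum(1 for s in scores if s < 8)
--     return {'low': below3,
--             'medium': below6 - below3,
--             'high': below8 - below6,
--             'critical': len(scores) - below8}
-- ===== Notes on version B (the rewrite author's own statement) =====
-- stated objective: alternative
-- what changed: Replaces the per-element if/elif bucket assignment by staged cumulative counting: one pass extracts the scores, three counting passes tally scores below each threshold, and each bucket is the difference of adjacent cumulative tallies; no element is ever assigned a bucket.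
import Mathlib
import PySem

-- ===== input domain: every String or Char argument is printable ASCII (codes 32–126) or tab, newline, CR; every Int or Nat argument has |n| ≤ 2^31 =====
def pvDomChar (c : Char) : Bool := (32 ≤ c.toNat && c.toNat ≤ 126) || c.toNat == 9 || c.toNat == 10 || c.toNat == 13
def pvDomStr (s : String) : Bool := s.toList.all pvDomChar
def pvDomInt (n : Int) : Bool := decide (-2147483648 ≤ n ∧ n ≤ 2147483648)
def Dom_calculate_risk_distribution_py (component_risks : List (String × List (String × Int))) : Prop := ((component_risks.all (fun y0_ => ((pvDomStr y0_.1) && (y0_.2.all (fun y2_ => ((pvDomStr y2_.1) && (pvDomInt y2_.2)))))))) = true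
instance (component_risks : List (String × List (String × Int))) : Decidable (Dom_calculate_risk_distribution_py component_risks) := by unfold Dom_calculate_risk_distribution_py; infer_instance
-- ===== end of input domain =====

-- B replaces A's per-element if/elif bucket assignment by staged cumulative threshold counts
-- whose adjacent differences are the buckets; return-value equivalence only.

-- ===== PORT A =====
def calculate_risk_distribution_py (component_risks : List (String × List (String × Int))) : List (String × Int) :=
  let distribution : PySem.Dict String Int :=
    PySem.Dict.ofList [("low", 0), ("medium", 0), ("high", 0), ("critical", 0)]
  let final := component_risks.foldl (fun dist p =>
    let risk_data : PySem.Dict String Int := PySem.Dict.mk p.2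
    -- risk_data['compound_risk']: KeyError when absent, excluded by Pre_ (getD's default is never used there)
    let risk_score := risk_data.getD "compound_risk" 0
    if risk_score < 3 then dist.modify "low" 0 (· + 1)
    else if risk_score < 6 then dist.modify "medium" 0 (· + 1)
    else if risk_score < 8 then dist.modify "high" 0 (· + 1)
    else dist.modify "critical" 0 (· + 1)) distribution
  final.items

-- ===== PORT B =====
def calculate_risk_distribution_py_alt (component_risks : List (String × List (String × Int))) : List (String × Int) :=
  let scores := component_risks.map (fun p => (PySem.Dict.mk p.2).getD "compound_risk" 0)
  let below3 : Int := scores.countP (fun s => s < 3)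
  let below6 : Int := scores.countP (fun s => s < 6)
  let below8 : Int := scores.countP (fun s => s < 8)
  [("low", below3), ("medium", below6 - below3), ("high", below8 - below6),
   ("critical", (scores.length : Int) - below8)]

-- ===== PRECONDITION & SPEC =====
-- Pre_ excludes exactly the inputs where some component's risk dict lacks the key
-- 'compound_risk', on which Python A raises KeyError (and B raises too).
def Pre_calculate_risk_distribution_py (component_risks : List (String × List (String × Int))) : Prop :=
  ∀ p ∈ component_risks, "compound_risk" ∈ p.2.map Prod.fst
instance (component_risks : List (String × List (String × Int))) : Decidable (Pre_calculate_risk_distribution_py component_risks) := by unfold Pre_calculate_risk_distribution_py; infer_instance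

def pvWitness_calculate_risk_distribution_py : (List (String × List (String × Int))) :=
  [("auth", [("compound_risk", 4)]), ("db", [("compound_risk", 9)])]

def Spec_calculate_risk_distribution_py (component_risks : List (String × List (String × Int))) (out : List (String × Int)) : Prop := out = calculate_risk_distribution_py_alt component_risks
instance (component_risks : List (String × List (String × Int))) (out : List (String × Int)) : Decidable (Spec_calculate_risk_distribution_py component_risks out) := by unfold Spec_calculate_risk_distribution_py; infer_instance

-- ===== CLAIM =====
def Claim_equal_calculate_risk_distribution_py : Prop := ∀ (component_risks : List (String × List (String × Int))), Dom_calculate_risk_distribution_py component_risks → Pre_calculate_risk_distribution_py component_risks → Spec_calculate_risk_distribution_py component_risks (calculate_risk_distribution_py component_risks)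

-- ===== LEMMAS AND PROOFS =====

-- evaluation of A's four dict updates on the invariant state shape
lemma pv_mlow (a b c d : Int) :
    (PySem.Dict.mk [("low", a), ("medium", b), ("high", c), ("critical", d)]).modify "low" 0 (· + 1)
    = PySem.Dict.mk [("low", a + 1), ("medium", b), ("high", c), ("critical", d)] := by rfl

lemma pv_mmed (a b c d : Int) :
    (PySem.Dict.mk [("low", a), ("medium", b), ("high", c), ("critical", d)]).modify "medium" 0 (· + 1)
    = PySem.Dict.mk [("low", a), ("medium", b + 1), ("high", c), ("critical", d)] := by rfl

lemma pv_mhigh (a b c d : Int) :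
    (PySem.Dict.mk [("low", a), ("medium", b), ("high", c), ("critical", d)]).modify "high" 0 (· + 1)
    = PySem.Dict.mk [("low", a), ("medium", b), ("high", c + 1), ("critical", d)] := by rfl

lemma pv_mcrit (a b c d : Int) :
    (PySem.Dict.mk [("low", a), ("medium", b), ("high", c), ("critical", d)]).modify "critical" 0 (· + 1)
    = PySem.Dict.mk [("low", a), ("medium", b), ("high", c), ("critical", d + 1)] := by rfl

-- core invariant over the extracted score list: A's bucket fold equals offsets plus
-- B's cumulative-count differences
lemma pv_core (l : List Int) (a b c d : Int) :
    (List.foldl (fun (dist : PySem.Dict String Int) (s : Int) =>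
        if s < 3 then dist.modify "low" 0 (· + 1)
        else if s < 6 then dist.modify "medium" 0 (· + 1)
        else if s < 8 then dist.modify "high" 0 (· + 1)
        else dist.modify "critical" 0 (· + 1))
      (PySem.Dict.mk [("low", a), ("medium", b), ("high", c), ("critical", d)]) l).items
    = [("low", a + (l.countP (fun s => s < 3) : Int)),
       ("medium", b + ((l.countP (fun s => s < 6) : Int) - (l.countP (fun s => s < 3) : Int))),
       ("high", c + ((l.countP (fun s => s < 8) : Int) - (l.countP (fun s => s < 6) : Int))),
       ("critical", d + ((l.length : Int) - (l.countP (fun s => s < 8) : Int)))] := by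
  induction l generalizing a b c d with
  | nil => simp
  | cons s xs ih =>
    simp only [List.foldl_cons, List.countP_cons, List.length_cons]
    by_cases h3 : s < 3
    · rw [if_pos h3, pv_mlow, ih]
      simp only [decide_eq_true h3, decide_eq_true (show s < 6 by omega),
          decide_eq_true (show s < 8 by omega), if_true]
      simp only [List.cons.injEq, Prod.mk.injEq, and_true, true_and]
      refine ⟨?_, ?_, ?_, ?_⟩ <;> omega
    · by_cases h6 : s < 6
      · rw [if_neg h3, if_pos h6, pv_mmed, ih]
        simp only [decide_eq_false h3, decide_eq_true h6,
            decide_eq_true (show s < 8 by omega), Bool.false_eq_true, if_true, if_false]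
        simp only [List.cons.injEq, Prod.mk.injEq, and_true, true_and]
        refine ⟨?_, ?_, ?_, ?_⟩ <;> omega
      · by_cases h8 : s < 8
        · rw [if_neg h3, if_neg h6, if_pos h8, pv_mhigh, ih]
          simp only [decide_eq_false h3, decide_eq_false h6, decide_eq_true h8,
              Bool.false_eq_true, if_true, if_false]
          simp only [List.cons.injEq, Prod.mk.injEq, and_true, true_and]
          refine ⟨?_, ?_, ?_, ?_⟩ <;> omega
        · rw [if_neg h3, if_neg h6, if_neg h8, pv_mcrit, ih]
          simp only [decide_eq_false h3, decide_eq_false h6, decide_eq_false h8,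
              Bool.false_eq_true, if_false]
          simp only [List.cons.injEq, Prod.mk.injEq, and_true, true_and]
          refine ⟨?_, ?_, ?_, ?_⟩ <;> omega

-- ===== VERDICT =====
theorem calculate_risk_distribution_py_spec : Claim_equal_calculate_risk_distribution_py := by
  intro crs _ _
  unfold Spec_calculate_risk_distribution_py calculate_risk_distribution_py calculate_risk_distribution_py_alt
  have hmap :
      (List.foldl (fun (dist : PySem.Dict String Int) (p : String × List (String × Int)) =>
          let risk_data : PySem.Dict String Int := PySem.Dict.mk p.2
          let risk_score := risk_data.getD "compound_risk" 0
          if risk_score < 3 then dist.modify "low" 0 (· + 1)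
          else if risk_score < 6 then dist.modify "medium" 0 (· + 1)
          else if risk_score < 8 then dist.modify "high" 0 (· + 1)
          else dist.modify "critical" 0 (· + 1))
        (PySem.Dict.mk [("low", 0), ("medium", 0), ("high", 0), ("critical", 0)]) crs)
      = List.foldl (fun (dist : PySem.Dict String Int) (s : Int) =>
          if s < 3 then dist.modify "low" 0 (· + 1)
          else if s < 6 then dist.modify "medium" 0 (· + 1)
          else if s < 8 then dist.modify "high" 0 (· + 1)
          else dist.modify "critical" 0 (· + 1))
        (PySem.Dict.mk [("low", 0), ("medium", 0), ("high", 0), ("critical", 0)])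
        (crs.map (fun p => (PySem.Dict.mk p.2).getD "compound_risk" 0)) :=
    (List.foldl_map (f := fun (p : String × List (String × Int)) => (PySem.Dict.mk p.2).getD "compound_risk" 0)
      (g := fun (dist : PySem.Dict String Int) (s : Int) =>
        if s < 3 then dist.modify "low" 0 (· + 1)
        else if s < 6 then dist.modify "medium" 0 (· + 1)
        else if s < 8 then dist.modify "high" 0 (· + 1)
        else dist.modify "critical" 0 (· + 1))).symm
  show (List.foldl (fun (dist : PySem.Dict String Int) (p : String × List (String × Int)) =>
          let risk_data : PySem.Dict String Int := PySem.Dict.mk p.2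
          let risk_score := risk_data.getD "compound_risk" 0
          if risk_score < 3 then dist.modify "low" 0 (· + 1)
          else if risk_score < 6 then dist.modify "medium" 0 (· + 1)
          else if risk_score < 8 then dist.modify "high" 0 (· + 1)
          else dist.modify "critical" 0 (· + 1))
        (PySem.Dict.mk [("low", 0), ("medium", 0), ("high", 0), ("critical", 0)]) crs).items = _
  rw [hmap, pv_core]
  simp only [zero_add]
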